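-- pv_equiv track=rewrite | github.com/flu-crew/flutile | flutile/functions.py | gapped_indices
-- ===== SOURCE A (Python) =====
-- from typing import List, Tuple, Set, Dict, TextIO, Optional, TypeVar, Callable, Iterable
--
-- def gapped_indices(seq: str) -> List[str]:
--     """
--     Given the gapped reference sequence, create index strings for use in aadiff site columns.
--
--     Any gaps before the first reference base translate to negative numbers
--     specifying the negative offset from the first reference base. Any gaps
--     after a reference base translate to strings specifying the positive offset.
--
--     For example:
--       "--AT--G-"  -->  ["-2", "-1", "1", "2", "2+1", "2+2", "3", "3+1"]
--     """
--
--     def _handle_run(run: int, ind: int) -> List[str]: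
--         if ind == 0:
--             return list(reversed([("-" + str(i)) for i in range(1, run + 1)]))
--         else:
--             return [f"{str(ind)}+{str(i)}" for i in range(1, run + 1)]
--
--     indices = []
--     run = 0
--     ind = 0
--     for i in range(len(seq)):
--         if seq[i] == "-":
--             run += 1
--         else:
--             if run > 0:
--                 indices += _handle_run(run, ind)
--                 run = 0
--             ind += 1
--             indices.append(str(ind))
--     if run > 0:
--         indices += _handle_run(run, ind)
--     return indices
-- ===== SOURCE B (Python) =====
-- from typing import List
--
-- def gapped_indices(seq: str) -> List[str]:
--     # Leading gaps: emit negative offsets up front, then one forward pass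
--     # emitting each label immediately (no buffered runs, no reversal).
--     k = 0
--     while k < len(seq) and seq[k] == "-":
--         k += 1
--     out = [str(-i) for i in range(k, 0, -1)]
--     ind = 0
--     j = 0
--     for c in seq[k:]:
--         if c == "-":
--             j += 1
--             out.append(f"{ind}+{j}")
--         else:
--             ind += 1
--             j = 0
--             out.append(str(ind))
--     return out
-- ===== Notes on version B (the rewrite author's own statement) =====
-- stated objective: simpler
-- what changed: B splits off the leading-gap prefix and emits its negative labels up front, then emits every remaining label immediately in one forward pass with a within-run counter, removing A's buffered-run state, its flush-on-base/flush-at-end handling, its ind==0 branch and its build-then-reverse helper.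
import Mathlib
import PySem

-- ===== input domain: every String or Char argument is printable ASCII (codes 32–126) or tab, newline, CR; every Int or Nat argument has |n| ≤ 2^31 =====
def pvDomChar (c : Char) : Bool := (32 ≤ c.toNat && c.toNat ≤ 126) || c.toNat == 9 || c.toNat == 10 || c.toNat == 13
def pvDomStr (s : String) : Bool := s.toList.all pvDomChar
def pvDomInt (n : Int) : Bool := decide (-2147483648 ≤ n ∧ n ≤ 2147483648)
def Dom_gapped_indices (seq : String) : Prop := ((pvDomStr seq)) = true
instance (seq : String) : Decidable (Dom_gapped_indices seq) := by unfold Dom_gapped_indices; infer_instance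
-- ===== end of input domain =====

-- B emits every label in one forward pass (leading negatives up front, gap labels immediately),
-- dropping A's buffered-run flushing and reversal helper; objective: simpler, same O(n) cost.

-- ===== PORT A =====
-- _handle_run(run, ind)
def pvHandleRun (run ind : Int) : List String :=
  if ind == 0 then
    ((PySem.List.pyRange 1 (run + 1) 1).map (fun i => "-" ++ PySem.Int.toStr i)).reverse
  else
    (PySem.List.pyRange 1 (run + 1) 1).map
      (fun i => PySem.Int.toStr ind ++ "+" ++ PySem.Int.toStr i)

-- the for-loop over seq with state (indices, run, ind); the `if run > 0` flush is kept in place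
def pvLoopA : List Char → List String → Int → Int → List String
  | [], indices, run, ind => if run > 0 then indices ++ pvHandleRun run ind else indices
  | c :: cs, indices, run, ind =>
    if c == '-' then
      pvLoopA cs indices (run + 1) ind
    else
      pvLoopA cs
        ((if run > 0 then indices ++ pvHandleRun run ind else indices) ++ [PySem.Int.toStr (ind + 1)])
        (if run > 0 then 0 else run) (ind + 1)

def gapped_indices (seq : String) : List String :=
  pvLoopA seq.toList [] 0 0

-- ===== PORT B =====
-- the forward loop over seq[k:] with state (out, ind, j); each label is appended immediately
def pvLoopB : List Char → List String → Int → Int → List String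
  | [], out, _, _ => out
  | c :: cs, out, ind, j =>
    if c == '-' then
      pvLoopB cs (out ++ [PySem.Int.toStr ind ++ "+" ++ PySem.Int.toStr (j + 1)]) ind (j + 1)
    else
      pvLoopB cs (out ++ [PySem.Int.toStr (ind + 1)]) (ind + 1) 0

def gapped_indices_alt (seq : String) : List String :=
  let l := seq.toList
  -- the `while` loop counting leading gaps: k = length of the longest '-' prefix
  let k := (l.takeWhile (fun c => c == '-')).length
  -- [str(-i) for i in range(k, 0, -1)]
  let out := (PySem.List.pyRange (k : Int) 0 (-1)).map (fun i => PySem.Int.toStr (-i))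
  -- seq[k:] with 0 ≤ k ≤ len(seq) is exactly List.drop k
  pvLoopB (l.drop k) out 0 0

-- ===== PRECONDITION & SPEC =====
def Spec_gapped_indices (seq : String) (out : List String) : Prop := out = gapped_indices_alt seq
instance (seq : String) (out : List String) : Decidable (Spec_gapped_indices seq out) := by unfold Spec_gapped_indices; infer_instance

-- ===== CLAIM (what is proved, stated in full; the proofs are below) =====
def Claim_equal_gapped_indices : Prop := ∀ (seq : String), Dom_gapped_indices seq → Spec_gapped_indices seq (gapped_indices seq)

-- ===== LEMMAS AND PROOFS =====

-- the positive-offset labels "n+1", …, "n+r" A's _handle_run produces for ind = n ≥ 1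
def posLab (n r : Int) : List String :=
  (PySem.List.pyRange 1 (r + 1) 1).map (fun i => PySem.Int.toStr n ++ "+" ++ PySem.Int.toStr i)

-- the leading negative labels "-k", …, "-1" as B builds them
def negLab (k : Nat) : List String :=
  (PySem.List.pyRange (k : Nat) 0 (-1)).map (fun i => PySem.Int.toStr (-i))

lemma posLab_zero (n : Int) : posLab n 0 = [] := by
  norm_num [posLab, PySem.List.pyRange]

lemma posLab_succ (n : Int) {r : Int} (hr : 0 ≤ r) :
    posLab n (r + 1) = posLab n r ++ [PySem.Int.toStr n ++ "+" ++ PySem.Int.toStr (r + 1)] := by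
  unfold posLab
  rw [PySem.List.pyRange_one_succ_right (by omega : (1 : Int) ≤ r + 1)]
  simp

lemma handle_pos {r n : Int} (hn : 1 ≤ n) : pvHandleRun r n = posLab n r := by
  unfold pvHandleRun posLab
  rw [if_neg (by simp; omega)]

lemma negLab_zero : negLab 0 = [] := by
  norm_num [negLab, PySem.List.pyRange]

lemma strNeg {n : Int} (hn : 0 < n) :
    "-" ++ PySem.Int.toStr n = PySem.Int.toStr (-n) := by
  have h : ("-" ++ PySem.Int.toStr n).toList = (PySem.Int.toStr (-n)).toList := by
    have h1 : (-n).natAbs = n.toNat := by omega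
    simp [PySem.Int.toList_toStr, PySem.Int.toChars, h1, not_lt.mpr (le_of_lt hn)]
    intro h
    exact absurd h (by omega)
  exact String.toList_inj.mp h

lemma pyRange_neg (k : Nat) :
    PySem.List.pyRange (k : Int) 0 (-1) =
      (List.range k).map (fun j : Nat => (k : Int) - (j : Int)) := by
  rcases Nat.eq_zero_or_pos k with h | h
  · subst h; norm_num [PySem.List.pyRange]
  · have h0 : (0 : Int) < k := by exact_mod_cast h
    simp only [PySem.List.pyRange, if_neg (show ¬((-1 : Int) = 0) by norm_num),
      if_neg (show ¬((0 : Int) < -1) by norm_num), if_pos h0, neg_neg, sub_zero]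
    rw [show ((k : Int) + 1 - 1) / 1 = (k : Int) by simp, Int.toNat_natCast]
    exact List.map_congr_left (fun j hj => by ring)

lemma negLab_succ (m : Nat) :
    negLab (m + 1) = PySem.Int.toStr (-((m : Int) + 1)) :: negLab m := by
  unfold negLab
  rw [pyRange_neg, pyRange_neg, List.range_succ_eq_map]
  rw [List.map_map, List.map_cons, List.map_map, List.map_map]
  refine List.cons_eq_cons.mpr ⟨?_, ?_⟩
  · simp only [Function.comp_apply]
    congr 1
  · refine List.map_congr_left (fun j hj => ?_)
    simp only [Function.comp_apply]
    congr 1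
    push_cast
    ring

lemma handle_neg (m : Nat) : pvHandleRun (m : Int) 0 = negLab m := by
  induction m with
  | zero => rw [negLab_zero]; decide
  | succ m ih =>
    unfold pvHandleRun at ih ⊢
    rw [if_pos (by simp)] at ih ⊢
    have hcast : ((m + 1 : Nat) : Int) + 1 = ((m : Int) + 1) + 1 := by push_cast; ring
    rw [hcast, PySem.List.pyRange_one_succ_right (by omega : (1 : Int) ≤ (m : Int) + 1)]
    rw [List.map_append, List.reverse_append]
    simp only [List.map_cons, List.map_nil, List.reverse_cons, List.reverse_nil,
      List.nil_append, List.singleton_append]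
    rw [ih, strNeg (by omega : (0 : Int) < (m : Int) + 1)]
    rw [negLab_succ]

-- main invariant: once the first base has been seen (ind = n ≥ 1), A with a pending run of r
-- buffered gaps equals B having already emitted those r gap labels
lemma loopAB (l : List Char) : ∀ (I : List String) (r n : Int), 0 ≤ r → 1 ≤ n →
    pvLoopA l I r n = pvLoopB l (I ++ posLab n r) n r := by
  induction l with
  | nil =>
    intro I r n hr hn
    simp only [pvLoopA, pvLoopB]
    by_cases h : r > 0
    · rw [if_pos h, handle_pos hn]
    · have hr0 : r = 0 := by omega
      subst hr0
      rw [if_neg h, posLab_zero, List.append_nil]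
  | cons c cs ih =>
    intro I r n hr hn
    by_cases hc : (c == '-') = true
    · simp only [pvLoopA, pvLoopB, if_pos hc]
      rw [ih I (r + 1) n (by omega) hn, posLab_succ n hr]
      simp [List.append_assoc]
    · simp only [pvLoopA, pvLoopB, if_neg hc]
      by_cases h : r > 0
      · simp only [if_pos h]
        rw [ih _ 0 (n + 1) le_rfl (by omega), handle_pos hn]
        simp [posLab_zero, List.append_assoc]
      · have hr0 : r = 0 := by omega
        subst hr0
        simp only [if_neg h]
        rw [ih _ 0 (n + 1) le_rfl (by omega)]
        simp [posLab_zero]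

-- leading phase: A counting r gaps from the start equals B with the negative labels precomputed
lemma loopLead (l : List Char) : ∀ (r : Nat),
    pvLoopA l [] (r : Int) 0 =
      pvLoopB (l.drop (l.takeWhile (fun c => c == '-')).length)
        (negLab (r + (l.takeWhile (fun c => c == '-')).length)) 0 0 := by
  induction l with
  | nil =>
    intro r
    simp only [pvLoopA, pvLoopB, List.takeWhile_nil, List.length_nil, List.drop_nil, Nat.add_zero]
    by_cases h : (r : Int) > 0
    · rw [if_pos h, handle_neg, List.nil_append]
    · have hr0 : r = 0 := by omega
      subst hr0
      rw [if_neg h, negLab_zero]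
  | cons c cs ih =>
    intro r
    by_cases hc : (c == '-') = true
    · rw [show List.takeWhile (fun c => c == '-') (c :: cs) =
          c :: List.takeWhile (fun c => c == '-') cs from by simp [hc]]
      simp only [pvLoopA, if_pos hc, List.length_cons, List.drop_succ_cons]
      have hadd : r + ((List.takeWhile (fun c => c == '-') cs).length + 1) =
          (r + 1) + (List.takeWhile (fun c => c == '-') cs).length := by omega
      rw [hadd]
      have := ih (r + 1)
      push_cast at this ⊢
      exact this
    · rw [show List.takeWhile (fun c => c == '-') (c :: cs) = [] from by simp [hc]]
      simp only [pvLoopA, pvLoopB, if_neg hc, List.length_nil, List.drop_zero, Nat.add_zero]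
      have hacc : (if (r : Int) > 0 then ([] : List String) ++ pvHandleRun r 0 else []) =
          negLab r := by
        by_cases h : (r : Int) > 0
        · rw [if_pos h, List.nil_append, handle_neg]
        · have hr0 : r = 0 := by omega
          subst hr0
          rw [if_neg h, negLab_zero]
      have hrun : (if (r : Int) > 0 then (0 : Int) else (r : Int)) = 0 := by
        split_ifs with h <;> omega
      rw [hacc, hrun]
      norm_num
      rw [loopAB cs (negLab r ++ [PySem.Int.toStr 1]) 0 1 le_rfl le_rfl, posLab_zero,
        List.append_nil]

-- ===== VERDICT (by name: the statement is the Claim_ definition above) =====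
theorem gapped_indices_spec : Claim_equal_gapped_indices := by
  intro seq _
  unfold Spec_gapped_indices gapped_indices gapped_indices_alt
  have h := loopLead seq.toList 0
  simpa [negLab] using h
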